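-- pv_equiv track=rewrite | github.com/ghunkins/Istoria | Google API/Gv_Test.py | hasRandom
-- ===== SOURCE A (Python) =====
-- def hasRandom(word):
--     if len(word) == 0 or word.isspace():
--         return False
--     letters = 'qwertyuiopasdfghjklmnbvcxzQWERTYUIOPASDFGHJKLMNBVCX'
--     numbers = '1234567890'
--     random = '@#$%^&*()+_=\|]}[{;:>,</.!?}"'
--     word_ = word[0:len(word)-1]
--     if len(word_) > 0:
--         prev_letter = word_[0]
--     for letter in word_:
--         if letter in random:
--             return True
--         if (prev_letter in letters and letter in numbers) or (prev_letter in numbers and letter in letters):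
--             return True
--         prev_letter = letter
--     # . ! ? are ok at end as punctuation
--     if word[-1] in random[0:24]:
--         return True
--     return False
-- ===== SOURCE B (Python) =====
-- def hasRandom(word):
--     if len(word) == 0 or word.isspace():
--         return False
--     letters = 'qwertyuiopasdfghjklmnbvcxzQWERTYUIOPASDFGHJKLMNBVCX'
--     numbers = '1234567890'
--     random = '@#$%^&*()+_=\|]}[{;:>,</.!?}"'
--     word_ = word[:-1]
--     if any(c in random for c in word_):
--         return True
--     if any((a in letters and b in numbers) or (a in numbers and b in letters)
--            for a, b in zip(word_, word_[1:])):
--         return True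
--     return word[-1] in random[0:24]
-- ===== Notes on version B (the rewrite author's own statement) =====
-- stated objective: alternative
-- what changed: Replaced the single loop carrying a prev_letter accumulator with two separate stateless passes: an any() scan for symbol characters, then an any() over adjacent pairs obtained by zipping word_ with word_[1:].
import Mathlib
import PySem

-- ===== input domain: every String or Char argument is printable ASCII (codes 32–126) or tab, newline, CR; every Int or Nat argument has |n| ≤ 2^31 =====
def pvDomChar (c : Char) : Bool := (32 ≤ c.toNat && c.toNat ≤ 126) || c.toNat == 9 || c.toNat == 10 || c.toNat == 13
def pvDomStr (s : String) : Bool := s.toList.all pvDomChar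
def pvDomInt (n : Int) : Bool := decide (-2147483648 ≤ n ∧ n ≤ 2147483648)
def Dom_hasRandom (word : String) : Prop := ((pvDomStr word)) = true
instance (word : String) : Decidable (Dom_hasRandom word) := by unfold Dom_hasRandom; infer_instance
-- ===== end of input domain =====

-- B replaces A's single prev_letter-accumulator loop by two stateless passes (a symbol scan,
-- then a scan over adjacent pairs via zip); same result, same cost ("alternative").
-- Single-character Python 'in <string literal>' is ported exactly as character membership.

-- ===== PORT A =====
def pvLetters : List Char := "qwertyuiopasdfghjklmnbvcxzQWERTYUIOPASDFGHJKLMNBVCX".toList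
def pvNumbers : List Char := "1234567890".toList
def pvRandomS : List Char := "@#$%^&*()+_=\\|]}[{;:>,</.!?}\"".toList

-- A's for-loop over word_ with the prev_letter accumulator; true = the loop returned True
def pvLoopA (prev : Char) (l : List Char) : Bool :=
  match l with
  | [] => false
  | c :: cs =>
    if pvRandomS.contains c then true
    else if (pvLetters.contains prev && pvNumbers.contains c)
            || (pvNumbers.contains prev && pvLetters.contains c) then true
    else pvLoopA c cs

def hasRandom (word : String) : Bool :=
  let cs := word.toList
  if cs.length = 0 || PySem.Chars.strIsspace cs then false
  else
    -- word_ = word[0:len(word)-1]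
    let word_ := PySem.List.slice cs (some 0) (some ((cs.length : Int) - 1))
    -- prev_letter initialised to word_[0] when word_ is non-empty; the loop may return True
    let loopRes := match word_ with
      | [] => false
      | c :: t => pvLoopA c (c :: t)
    if loopRes then true
    else
      -- word[-1] in random[0:24]
      match PySem.List.pyGet? cs (-1) with
      | some c => (PySem.List.slice pvRandomS (some 0) (some 24)).contains c
      | none => false

-- ===== PORT B =====
def pvMixedPair (p : Char × Char) : Bool :=
  (pvLetters.contains p.1 && pvNumbers.contains p.2)
    || (pvNumbers.contains p.1 && pvLetters.contains p.2)

def hasRandom_alt (word : String) : Bool :=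
  let cs := word.toList
  if cs.length = 0 || PySem.Chars.strIsspace cs then false
  else
    -- word_ = word[:-1]
    let word_ := PySem.List.slice cs none (some (-1))
    if word_.any (fun c => pvRandomS.contains c) then true
    else if (word_.zip (PySem.List.slice word_ (some 1) none)).any pvMixedPair then true
    else
      match PySem.List.pyGet? cs (-1) with
      | some c => (PySem.List.slice pvRandomS (some 0) (some 24)).contains c
      | none => false

-- ===== PRECONDITION & SPEC =====
def Spec_hasRandom (word : String) (out : Bool) : Prop := out = hasRandom_alt word
instance (word : String) (out : Bool) : Decidable (Spec_hasRandom word out) := by unfold Spec_hasRandom; infer_instance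

-- ===== CLAIM (what is proved, stated in full; the proofs are below) =====
def Claim_equal_hasRandom : Prop := ∀ (word : String), Dom_hasRandom word → Spec_hasRandom word (hasRandom word)

-- ===== LEMMAS AND PROOFS =====

-- no character is in both pvLetters and pvNumbers
lemma pvLetters_numbers_disjoint :
    pvLetters.all (fun c => !pvNumbers.contains c) = true := by decide

lemma pvMixed_self (c : Char) : pvMixedPair (c, c) = false := by
  unfold pvMixedPair
  by_cases hL : pvLetters.contains c = true
  · have := (List.all_eq_true.mp pvLetters_numbers_disjoint) c
      (by simpa using hL)
    simp at this
    simp [this]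
  · simp at hL
    simp [hL]

-- A's accumulator loop equals a symbol scan plus a scan over the chained pairs
lemma pvLoopA_eq (l : List Char) (prev : Char) :
    pvLoopA prev l
      = (l.any (fun c => pvRandomS.contains c)
          || ((prev :: l).zip l).any pvMixedPair) := by
  induction l generalizing prev with
  | nil => simp [pvLoopA]
  | cons c cs ih =>
    rw [pvLoopA, ih c]
    have hfold : (pvLetters.contains prev && pvNumbers.contains c
        || (pvNumbers.contains prev && pvLetters.contains c)) = pvMixedPair (prev, c) := rfl
    rw [hfold]
    simp only [List.any_cons, List.zip_cons_cons]
    cases hr : pvRandomS.contains c <;> cases hm : pvMixedPair (prev, c) <;>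
      simp [Bool.or_comm]

-- the loop started at the head of word_ is exactly B's two passes
lemma pvLoop_head_eq (l : List Char) :
    (match l with | [] => false | c :: t => pvLoopA c (c :: t))
      = (l.any (fun c => pvRandomS.contains c) || (l.zip (l.drop 1)).any pvMixedPair) := by
  cases l with
  | nil => simp
  | cons c t =>
    simp only [pvLoopA_eq, List.zip_cons_cons, List.any_cons, pvMixed_self, List.drop_succ_cons,
      List.drop_zero]
    simp

-- ===== VERDICT (by name: the statement is the Claim_ definition above) =====
theorem hasRandom_spec : Claim_equal_hasRandom := by
  intro word _
  unfold Spec_hasRandom hasRandom hasRandom_alt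
  set cs := word.toList with hcs
  by_cases hguard : (cs.length = 0 || PySem.Chars.strIsspace cs) = true
  · rw [if_pos hguard, if_pos hguard]
  · rw [if_neg hguard, if_neg hguard]
    have hne : cs.length ≠ 0 := by
      intro h; simp [h] at hguard
    have hA : PySem.List.slice cs (some 0) (some ((cs.length : Int) - 1)) = cs.dropLast := by
      rw [PySem.List.slice_zero_start]
      have h1 : ((cs.length : Int) - 1) = ((cs.length - 1 : Nat) : Int) := by omega
      rw [h1, PySem.List.slice_to_natCast, ← List.dropLast_eq_take]
    have hB : PySem.List.slice cs none (some (-1)) = cs.dropLast :=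
      PySem.List.slice_to_neg_one cs
    have hTail : PySem.List.slice cs.dropLast (some 1) none = cs.dropLast.drop 1 := by
      have h1 : (1 : Int) = ((1 : Nat) : Int) := rfl
      rw [h1, PySem.List.slice_from_natCast]
    simp only [hA, hB, hTail, pvLoop_head_eq]
    cases h1 : cs.dropLast.any (fun c => pvRandomS.contains c) <;>
      cases h2 : (cs.dropLast.zip (cs.dropLast.drop 1)).any pvMixedPair <;>
      simp
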